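-- pv_equiv track=rewrite | github.com/JPerkins2024/cs499-project | ifxdevsim/build/lib/ifxdevsim/metrics/metric.py | find_param
-- ===== SOURCE A (Python) =====
-- def find_param(par, param_dict):
--     if len(par) == 0:
--         return None
--     lookups = ["instance parameters", "stimuli", "control"]
--     for name in lookups:
--         if param_dict.get(name) and par in param_dict[name]:
--             return param_dict[name][par]
--     return None
-- ===== SOURCE B (Python) =====
-- def find_param(par, param_dict):
--     if len(par) == 0:
--         return None
--     merged = {}
--     for name in ("instance parameters", "stimuli", "control"):
--         sec = param_dict.get(name)
--         if sec:
--             for key, value in sec.items():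
--                 merged.setdefault(key, value)
--     return merged.get(par)
-- ===== Notes on version B (the rewrite author's own statement) =====
-- stated objective: alternative
-- what changed: Replaces the per-section membership-test-then-indexing scan with a single merged table built once over the three sections in priority order via setdefault (first writer wins), followed by one lookup.
import Mathlib
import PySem

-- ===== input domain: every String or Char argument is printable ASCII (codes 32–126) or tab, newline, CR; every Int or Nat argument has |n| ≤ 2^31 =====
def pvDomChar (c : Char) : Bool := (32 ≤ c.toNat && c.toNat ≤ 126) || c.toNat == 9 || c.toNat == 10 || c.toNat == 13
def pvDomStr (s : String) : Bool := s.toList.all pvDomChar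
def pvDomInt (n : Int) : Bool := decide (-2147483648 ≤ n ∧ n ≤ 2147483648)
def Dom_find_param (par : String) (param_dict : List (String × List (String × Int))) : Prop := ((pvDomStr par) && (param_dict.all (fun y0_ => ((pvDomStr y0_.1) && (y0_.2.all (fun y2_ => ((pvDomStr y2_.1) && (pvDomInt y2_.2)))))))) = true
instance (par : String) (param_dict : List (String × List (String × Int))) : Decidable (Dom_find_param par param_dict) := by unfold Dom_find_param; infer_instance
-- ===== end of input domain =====

-- B replaces A's per-section test-then-index scan with one merged table (setdefault in
-- priority order) followed by a single lookup; objective: alternative decomposition.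

-- ===== PORT A =====
-- 'for name in lookups: if param_dict.get(name) and par in param_dict[name]: return param_dict[name][par]'
def find_param_loop (par : String) (param_dict : List (String × List (String × Int))) : List String → Option Int
  | [] => none
  | name :: rest =>
    match (PySem.Dict.mk param_dict).get? name with
    | some sec =>
        if !sec.isEmpty && (PySem.Dict.mk sec).contains par then
          (PySem.Dict.mk sec).get? par
        else find_param_loop par param_dict rest
    | none => find_param_loop par param_dict rest

def find_param (par : String) (param_dict : List (String × List (String × Int))) : Option Int :=
  if par.length == 0 then none
  else find_param_loop par param_dict ["instance parameters", "stimuli", "control"]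

-- ===== PORT B =====
-- one merged dict: for each section in priority order, merged.setdefault(key, value) per item
def find_param_alt (par : String) (param_dict : List (String × List (String × Int))) : Option Int :=
  if par.length == 0 then none
  else
    let merged : PySem.Dict String Int :=
      ["instance parameters", "stimuli", "control"].foldl
        (fun m name =>
          match (PySem.Dict.mk param_dict).get? name with
          | some sec => if !sec.isEmpty then sec.foldl (fun m p => m.setdefault p.1 p.2) m else m
          | none => m)
        PySem.Dict.empty
    merged.get? par

-- ===== PRECONDITION & SPEC =====
def Spec_find_param (par : String) (param_dict : List (String × List (String × Int))) (out : Option Int) : Prop := out = find_param_alt par param_dict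
instance (par : String) (param_dict : List (String × List (String × Int))) (out : Option Int) : Decidable (Spec_find_param par param_dict out) := by unfold Spec_find_param; infer_instance

-- ===== CLAIM (what is proved, stated in full; the proofs are below) =====
def Claim_equal_find_param : Prop := ∀ (par : String) (param_dict : List (String × List (String × Int))), Dom_find_param par param_dict → Spec_find_param par param_dict (find_param par param_dict)

-- ===== LEMMAS AND PROOFS =====

-- lookup after a setdefault-fold: existing entries of m win, otherwise first match in sec
theorem get?_foldl_setdefault (par : String) (sec : List (String × Int)) (m : PySem.Dict String Int) :
    (sec.foldl (fun m p => m.setdefault p.1 p.2) m).get? par =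
      match m.get? par with
      | some v => some v
      | none => (PySem.Dict.mk sec).get? par := by
  induction sec generalizing m with
  | nil =>
    cases h : m.get? par
    · simp [h]; rfl
    · simp [h]
  | cons p rest ih =>
    rw [List.foldl_cons, ih]
    rw [PySem.Dict.get?_mk_cons]
    by_cases hk : p.1 = par
    · subst hk
      by_cases hc : m.contains p.1
      · rw [PySem.Dict.setdefault_of_contains _ _ hc]
        rcases h : m.get? p.1 with _ | v
        · rw [PySem.Dict.get?_eq_none_iff_contains] at h
          simp [h] at hc
        · simp
      · rw [PySem.Dict.setdefault_of_not_contains _ _ (by simpa using hc)]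
        have h : m.get? p.1 = none := by
          rw [PySem.Dict.get?_eq_none_iff_contains]; simpa using hc
        simp [h, PySem.Dict.get?_insert_self]
    · have hs : (m.setdefault p.1 p.2).get? par = m.get? par := by
        by_cases hc : m.contains p.1
        · rw [PySem.Dict.setdefault_of_contains _ _ hc]
        · rw [PySem.Dict.setdefault_of_not_contains _ _ (by simpa using hc)]
          exact PySem.Dict.get?_insert_of_ne _ _ (Ne.symm hk)
      rw [hs]
      simp [show (p.1 == par) = false from beq_eq_false_iff_ne.mpr hk]

-- the merged-table lookup equals A's first-hit loop for any name list and accumulator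
theorem foldl_merge_eq_loop (par : String) (param_dict : List (String × List (String × Int)))
    (names : List String) (m : PySem.Dict String Int) :
    (names.foldl
        (fun m name =>
          match (PySem.Dict.mk param_dict).get? name with
          | some sec => if !sec.isEmpty then sec.foldl (fun m p => m.setdefault p.1 p.2) m else m
          | none => m)
        m).get? par =
      match m.get? par with
      | some v => some v
      | none => find_param_loop par param_dict names := by
  induction names generalizing m with
  | nil => cases h : m.get? par <;> simp [h, find_param_loop]
  | cons name rest ih =>
    rw [List.foldl_cons, ih]
    rcases hlk : (PySem.Dict.mk param_dict).get? name with _ | sec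
    · simp [find_param_loop, hlk]
    · by_cases hne : sec.isEmpty
      · simp [find_param_loop, hlk, hne]
      · simp only [hne, Bool.not_false, if_true]
        rw [get?_foldl_setdefault]
        rcases hm : m.get? par with _ | w
        · rcases hsec : (PySem.Dict.mk sec).get? par with _ | v
          · have hc : (PySem.Dict.mk sec).contains par = false := by
              rw [← PySem.Dict.get?_eq_none_iff_contains] at *; exact hsec
            simp [find_param_loop, hlk, hne, hc]
          · have hc : (PySem.Dict.mk sec).contains par = true := by
              rw [PySem.Dict.contains_eq_isSome_get?, hsec]; rfl
            simp [find_param_loop, hlk, hne, hc, hsec]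
        · rfl

-- ===== VERDICT (by name: the statement is the Claim_ definition above) =====
theorem find_param_spec : Claim_equal_find_param := by
  intro par param_dict _
  unfold Spec_find_param find_param find_param_alt
  by_cases h : par.length == 0
  · simp [h]
  · simp only [h, if_false, Bool.false_eq_true]
    rw [foldl_merge_eq_loop]
    simp [PySem.Dict.get?_empty]
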